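-- pv_equiv track=rewrite | github.com/vilasopher/manim | test/trees.py | rtb_ne
-- ===== SOURCE A (Python) =====
-- def rtb_ne(d, r):
--     if r == 1:
--         nodes = ['', 'a', 'b', 'c']
--         edges = [('', 'a'), ('', 'b'), ('', 'c')]
--         return nodes, edges
--     else:
--         nodes, edges = rtb_ne(d,r-1)
--         maxlength = max([len(v) for v in nodes])
--         outernodes = [v for v in nodes if len(v) == maxlength]
--
--         newnodes = [v + x for v in outernodes for x in 'abc' if v[-1] != x]
--         newedges = [(v, v+x) for v in outernodes for x in 'abc' if v[-1] != x]
--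
--         return nodes + newnodes, edges + newedges
-- ===== SOURCE B (Python) =====
-- def rtb_ne(d, r):
--     nodes = ['', 'a', 'b', 'c']
--     edges = [('', 'a'), ('', 'b'), ('', 'c')]
--     frontier = ['a', 'b', 'c']
--     for _ in range(r - 1):
--         newedges = [(v, v + x) for v in frontier for x in 'abc' if v[-1] != x]
--         frontier = [c for _, c in newedges]
--         nodes += frontier
--         edges += newedges
--     return nodes, edges
-- ===== Notes on version B (the rewrite author's own statement) =====
-- stated objective: alternative
-- what changed: Replaces the recursion that at each level recomputes max(len) over all nodes so far and re-filters the whole node list with an iterative loop that carries the frontier (the current outermost level) explicitly, appending new nodes/edges in the same order; since levels double in size, the avoided rescans are only a constant factor (measured ~1.3x), so no speed is claimed.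
import Mathlib
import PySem

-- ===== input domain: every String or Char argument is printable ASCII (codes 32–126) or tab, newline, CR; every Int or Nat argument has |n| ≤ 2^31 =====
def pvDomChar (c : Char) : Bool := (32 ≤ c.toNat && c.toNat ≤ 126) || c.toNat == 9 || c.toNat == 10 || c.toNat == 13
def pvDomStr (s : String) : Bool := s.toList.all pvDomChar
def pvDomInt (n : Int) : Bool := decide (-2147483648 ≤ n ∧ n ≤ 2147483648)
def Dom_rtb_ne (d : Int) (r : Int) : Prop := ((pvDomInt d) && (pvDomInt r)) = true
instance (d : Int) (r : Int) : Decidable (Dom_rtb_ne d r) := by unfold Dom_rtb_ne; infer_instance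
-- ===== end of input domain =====

-- B replaces A's recursion (which rescans all nodes each level for max length) by an
-- iterative loop carrying the current frontier explicitly, same emission order.


-- ===== PORT A =====
-- literal port of A's recursion; A diverges for r ≤ 0 (excluded by Pre_), so the
-- base case is reached under the totality guard 'r ≤ 1' (same value at r = 1).
def rtb_ne (d : Int) (r : Int) : List String × (List (String × String)) :=
  if r ≤ 1 then
    (["", "a", "b", "c"], [("", "a"), ("", "b"), ("", "c")])
  else
    let p := rtb_ne d (r - 1)
    let nodes := p.1
    let edges := p.2
    let maxlength := (PySem.List.max? (nodes.map (fun v => PySem.Str.len v)) (fun y => y)).getD 0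
    let outernodes := nodes.filter (fun v => PySem.Str.len v == maxlength)
    let newnodes := outernodes.flatMap (fun v =>
      (['a', 'b', 'c'] : List Char).filterMap (fun x =>
        if PySem.Str.pyGet? v (-1) ≠ some x then some (String.ofList (v.toList ++ [x])) else none))
    let newedges := outernodes.flatMap (fun v =>
      (['a', 'b', 'c'] : List Char).filterMap (fun x =>
        if PySem.Str.pyGet? v (-1) ≠ some x then some (v, String.ofList (v.toList ++ [x])) else none))
    (nodes ++ newnodes, edges ++ newedges)
termination_by r.toNat
decreasing_by simp at *; omega

-- ===== PORT B =====
def rtb_ne_alt (d : Int) (r : Int) : List String × (List (String × String)) :=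
  let st := (List.range (r - 1).toNat).foldl (fun st _ =>
    let newedges := st.2.2.flatMap (fun v =>
      (['a', 'b', 'c'] : List Char).filterMap (fun x =>
        if PySem.Str.pyGet? v (-1) ≠ some x then some (v, String.ofList (v.toList ++ [x])) else none))
    let frontier := newedges.map (fun e => e.2)
    (st.1 ++ frontier, st.2.1 ++ newedges, frontier))
    ((["", "a", "b", "c"], [("", "a"), ("", "b"), ("", "c")],
      ["a", "b", "c"]) : List String × List (String × String) × List String)
  (st.1, st.2.1)

-- ===== PRECONDITION & SPEC =====
-- A recurses on r-1 with base case r == 1 only: for r ≤ 0 it never returns (RecursionError).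
def Pre_rtb_ne (d : Int) (r : Int) : Prop := 1 ≤ r
instance (d : Int) (r : Int) : Decidable (Pre_rtb_ne d r) := by unfold Pre_rtb_ne; infer_instance
def pvWitness_rtb_ne : Int × Int := (0, 3)

def Spec_rtb_ne (d : Int) (r : Int) (out : List String × (List (String × String))) : Prop := out = rtb_ne_alt d r
instance (d : Int) (r : Int) (out : List String × (List (String × String))) : Decidable (Spec_rtb_ne d r out) := by unfold Spec_rtb_ne; infer_instance

-- ===== CLAIM (what is proved, stated in full; the proofs are below) =====
def Claim_equal_rtb_ne : Prop := ∀ (d : Int) (r : Int), Dom_rtb_ne d r → Pre_rtb_ne d r → Spec_rtb_ne d r (rtb_ne d r)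

-- ===== LEMMAS AND PROOFS =====

def pvInner (v : String) : List (String × String) :=
  (['a', 'b', 'c'] : List Char).filterMap (fun x =>
    if PySem.Str.pyGet? v (-1) ≠ some x then some (v, String.ofList (v.toList ++ [x])) else none)

def pvStep (fr : List String) : List (String × String) := fr.flatMap pvInner

def pvIter : Nat → List String × List (String × String) × List String
  | 0 => (["", "a", "b", "c"], [("", "a"), ("", "b"), ("", "c")], ["a", "b", "c"])
  | n + 1 =>
      let s := pvIter n
      let ne := pvStep s.2.2
      (s.1 ++ ne.map (fun e => e.2), s.2.1 ++ ne, ne.map (fun e => e.2))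

theorem pv_fold (m : Nat) :
    (List.range m).foldl (fun st (_ : Nat) =>
      let newedges := st.2.2.flatMap (fun v =>
        (['a', 'b', 'c'] : List Char).filterMap (fun x =>
          if PySem.Str.pyGet? v (-1) ≠ some x then some (v, String.ofList (v.toList ++ [x])) else none))
      let frontier := newedges.map (fun e => e.2)
      (st.1 ++ frontier, st.2.1 ++ newedges, frontier))
      ((["", "a", "b", "c"], [("", "a"), ("", "b"), ("", "c")],
        ["a", "b", "c"]) : List String × List (String × String) × List String)
      = pvIter m := by
  induction m with
  | zero => rfl
  | succ k ih =>
      rw [List.range_succ, List.foldl_append, ih]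
      rfl

theorem pv_alt_eq (d : Int) (r : Int) :
    rtb_ne_alt d r = ((pvIter (r - 1).toNat).1, (pvIter (r - 1).toNat).2.1) := by
  unfold rtb_ne_alt
  rw [pv_fold]

theorem pv_inner_nodes (v : String) :
    (['a', 'b', 'c'] : List Char).filterMap (fun x =>
      if PySem.Str.pyGet? v (-1) ≠ some x then some (String.ofList (v.toList ++ [x])) else none)
      = (pvInner v).map (fun e => e.2) := by
  unfold pvInner
  rw [List.map_filterMap]
  congr 1
  funext x
  by_cases h : PySem.List.pyGet? v.toList (-1) = some x <;> simp [h]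

theorem pv_inner_ne (v : String) : pvInner v ≠ [] := by
  unfold pvInner
  by_cases h : PySem.List.pyGet? v.toList (-1) = some 'a'
  · simp [List.filterMap, h]
  · simp [List.filterMap, h]

theorem pv_step_len (n : Nat) (fr : List String)
    (h : ∀ v ∈ fr, PySem.Str.len v = (n : Int) + 1) :
    ∀ e ∈ pvStep fr, PySem.Str.len e.2 = (n : Int) + 2 := by
  intro e he
  unfold pvStep at he
  rw [List.mem_flatMap] at he
  obtain ⟨v, hv, he⟩ := he
  unfold pvInner at he
  rw [List.mem_filterMap] at he
  obtain ⟨x, _, hx⟩ := he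
  split at hx
  · cases hx.symm
    have := h v hv
    simp [PySem.Str.len_eq] at this ⊢
    omega
  · cases hx

theorem pv_max_eq (n : Nat) (olds fr : List String)
    (ho : ∀ v ∈ olds, PySem.Str.len v ≤ (n : Int))
    (hf : ∀ v ∈ fr, PySem.Str.len v = (n : Int) + 1)
    (hne : fr ≠ []) :
    (PySem.List.max? ((olds ++ fr).map (fun v => PySem.Str.len v)) (fun y => y)).getD 0
      = (n : Int) + 1 := by
  obtain ⟨w, fr', rfl⟩ : ∃ w fr', fr = w :: fr' := by
    cases fr with
    | nil => exact absurd rfl hne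
    | cons a b => exact ⟨a, b, rfl⟩
  obtain ⟨m, hm⟩ : ∃ m, PySem.List.max? ((olds ++ w :: fr').map (fun v => PySem.Str.len v)) (fun y => y) = some m := by
    cases hmax : PySem.List.max? ((olds ++ w :: fr').map (fun v => PySem.Str.len v)) (fun y => y) with
    | none => rw [PySem.List.max?_eq_none_iff] at hmax; simp at hmax
    | some m => exact ⟨m, rfl⟩
  rw [hm]
  have hmem := PySem.List.max?_mem hm
  have hmax := PySem.List.max?_isMax hm
  have hub : (n : Int) + 1 ≤ m := by
    have := hmax (PySem.Str.len w) (by simp)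
    have hw := hf w (by simp)
    simp [PySem.Str.len_eq] at this hw
    omega
  rw [List.mem_map] at hmem
  obtain ⟨v, hv, rfl⟩ := hmem
  rcases List.mem_append.1 hv with hvo | hvf
  · have := ho v hvo
    simp [PySem.Str.len_eq] at this hub ⊢
    omega
  · have := hf v hvf
    simp [PySem.Str.len_eq] at this ⊢
    omega

theorem pv_filter_eq (n : Nat) (olds fr : List String)
    (ho : ∀ v ∈ olds, PySem.Str.len v ≤ (n : Int))
    (hf : ∀ v ∈ fr, PySem.Str.len v = (n : Int) + 1) :
    (olds ++ fr).filter (fun v => PySem.Str.len v == (n : Int) + 1) = fr := by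
  rw [List.filter_append]
  have h1 : olds.filter (fun v => PySem.Str.len v == (n : Int) + 1) = [] := by
    rw [List.filter_eq_nil_iff]
    intro v hv
    have := ho v hv
    simp [PySem.Str.len_eq] at this ⊢
    omega
  have h2 : fr.filter (fun v => PySem.Str.len v == (n : Int) + 1) = fr := by
    rw [List.filter_eq_self]
    intro v hv
    have := hf v hv
    simp [PySem.Str.len_eq] at this ⊢
    omega
  rw [h1, h2, List.nil_append]

theorem pv_main (d : Int) (n : Nat) :
    rtb_ne d ((n : Int) + 1) = ((pvIter n).1, (pvIter n).2.1)
    ∧ ∃ olds, (pvIter n).1 = olds ++ (pvIter n).2.2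
        ∧ (∀ v ∈ olds, PySem.Str.len v ≤ (n : Int))
        ∧ (∀ v ∈ (pvIter n).2.2, PySem.Str.len v = (n : Int) + 1)
        ∧ (pvIter n).2.2 ≠ [] := by
  induction n with
  | zero =>
      refine ⟨by rw [rtb_ne]; norm_num; exact ⟨rfl, rfl⟩, [""], rfl, ?_, ?_, by decide⟩
      · intro v hv; simp at hv; subst hv; decide
      · intro v hv; fin_cases hv <;> decide
  | succ k ih =>
      obtain ⟨heq, olds, hsplit, ho, hfr, hne⟩ := ih
      have hc : ((k + 1 : Nat) : Int) + 1 = ((k : Int) + 1) + 1 := by push_cast; ring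
      rw [hc, rtb_ne, if_neg (by omega)]
      have harg : ((k : Int) + 1) + 1 - 1 = (k : Int) + 1 := by ring
      rw [harg, heq]
      simp only []
      have hmax := pv_max_eq k olds (pvIter k).2.2 ho hfr hne
      rw [hsplit, hmax, pv_filter_eq k olds (pvIter k).2.2 ho hfr]
      have hnodes : ((pvIter k).2.2).flatMap (fun v =>
          (['a', 'b', 'c'] : List Char).filterMap (fun x =>
            if PySem.Str.pyGet? v (-1) ≠ some x then some (String.ofList (v.toList ++ [x])) else none))
          = (pvStep (pvIter k).2.2).map (fun e => e.2) := by
        unfold pvStep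
        rw [List.map_flatMap]
        exact List.flatMap_congr (fun v _ => pv_inner_nodes v)
      have hedges : ((pvIter k).2.2).flatMap (fun v =>
          (['a', 'b', 'c'] : List Char).filterMap (fun x =>
            if PySem.Str.pyGet? v (-1) ≠ some x then some (v, String.ofList (v.toList ++ [x])) else none))
          = pvStep (pvIter k).2.2 := rfl
      rw [hnodes, hedges]
      have hstepne : pvStep (pvIter k).2.2 ≠ [] := by
        obtain ⟨w, fr', hw⟩ : ∃ w fr', (pvIter k).2.2 = w :: fr' := by
          cases hfr2 : (pvIter k).2.2 with
          | nil => exact absurd hfr2 hne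
          | cons a b => exact ⟨a, b, rfl⟩
        rw [hw]
        unfold pvStep
        rw [List.flatMap_cons]
        intro hcon
        exact pv_inner_ne w (List.append_eq_nil_iff.1 hcon).1
      refine ⟨?_, olds ++ (pvIter k).2.2, ?_, ?_, ?_, ?_⟩
      · show _ = ((pvIter (k + 1)).1, (pvIter (k + 1)).2.1)
        simp only [pvIter, hsplit]
      · show (pvIter (k + 1)).1 = _
        simp only [pvIter, hsplit]
      · intro v hv
        rcases List.mem_append.1 hv with h1 | h2
        · have := ho v h1; push_cast; omega
        · have := hfr v h2; push_cast; omega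
      · intro v hv
        show PySem.Str.len v = ((k + 1 : Nat) : Int) + 1
        have : (pvIter (k + 1)).2.2 = (pvStep (pvIter k).2.2).map (fun e => e.2) := by
          simp only [pvIter]
        rw [this] at hv
        rw [List.mem_map] at hv
        obtain ⟨e, he, rfl⟩ := hv
        have := pv_step_len k (pvIter k).2.2 hfr e he
        push_cast
        omega
      · show (pvIter (k + 1)).2.2 ≠ []
        simp only [pvIter]
        simpa using hstepne

-- ===== VERDICT (by name: the statement is the Claim_ definition above) =====
theorem rtb_ne_spec : Claim_equal_rtb_ne := by
  intro d r _ hpre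
  unfold Spec_rtb_ne
  obtain ⟨n, rfl⟩ : ∃ n : Nat, r = (n : Int) + 1 :=
    ⟨(r - 1).toNat, by unfold Pre_rtb_ne at hpre; omega⟩
  rw [pv_alt_eq]
  have h : ((n : Int) + 1 - 1).toNat = n := by omega
  rw [h]
  exact (pv_main d n).1
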